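-- pv_equiv track=rewrite | github.com/David-5-5/tutorial | python/algo/202510/algo1621.py | numberOfSets3
-- ===== SOURCE A (Python) =====
-- def numberOfSets3(n: int, k: int) -> int:
--     # 递归 -> 递推
--     mod = 10 **9 + 7
--     dp = [[0]*(k+1) for _ in range(n)]
--     dp[0][0] = 1
--
--     # 动态规划 超时
--     for i in range(1, n):
--         dp[i][0] = 1 # 设置为 1, j 从 1..k 开始
--         for j in range(1, k+1):
--             dp[i][j] = dp[i-1][j]       # 不选
--             max_k = i-j+2
--             for k_len in range(1, max_k):
--                 dp[i][j] += dp[i-k_len][j-1]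
--             dp[i][j] %= mod
--
--     return dp[n-1][k]
-- ===== SOURCE B (Python) =====
-- def numberOfSets3(n: int, k: int) -> int:
--     # Column-by-column DP with a running (prefix) sum: O(n*k) instead of O(n^2*k).
--     mod = 10 ** 9 + 7
--     prev = [1] * n                # column j = 0: dp[i][0] == 1 for every i
--     for j in range(1, k + 1):
--         cur = [0] * n
--         s = 0                     # running sum of prev[j-1 .. i-1], taken mod
--         for i in range(1, n):
--             if i >= j:
--                 s = (s + prev[i - 1]) % mod
--             cur[i] = (cur[i - 1] + s) % mod
--         prev = cur
--     return prev[n - 1]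
-- ===== Notes on version B (the rewrite author's own statement) =====
-- stated objective: faster
-- what changed: Replaced the O(n)-long inner segment-length loop by a running modular prefix sum over the previous DP column, processing the table column by column with only the previous column kept.
import Mathlib
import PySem

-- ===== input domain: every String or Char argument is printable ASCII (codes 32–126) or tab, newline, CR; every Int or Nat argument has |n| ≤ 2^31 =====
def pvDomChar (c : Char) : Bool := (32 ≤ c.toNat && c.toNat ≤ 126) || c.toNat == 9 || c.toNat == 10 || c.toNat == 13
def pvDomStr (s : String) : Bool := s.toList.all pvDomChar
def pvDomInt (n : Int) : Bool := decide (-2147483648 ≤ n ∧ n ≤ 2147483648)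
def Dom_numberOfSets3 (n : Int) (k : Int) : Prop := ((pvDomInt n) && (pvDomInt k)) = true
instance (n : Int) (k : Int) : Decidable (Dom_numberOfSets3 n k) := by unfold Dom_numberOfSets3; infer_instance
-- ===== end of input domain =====

-- B replaces A's O(n)-long inner segment-length loop by a running modular prefix sum over the
-- previous DP column (column-by-column DP), an asymptotic speed-up; equal return value proved on n ≥ 1, k ≥ 0.


-- ===== PORT A =====
def numberOfSets3 (n : Int) (k : Int) : Int :=
  let md : Int := 10 ^ 9 + 7
  let dp : List (List Int) :=
    (PySem.List.pyRange 0 n 1).map (fun _ => List.replicate (k + 1).toNat 0)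
  let dp := PySem.List.pySetD dp 0 (PySem.List.pySetD (PySem.List.pyGetD dp 0 []) 0 1)
  let dp := (PySem.List.pyRange 1 n 1).foldl (fun dp i =>
    let dp := PySem.List.pySetD dp i (PySem.List.pySetD (PySem.List.pyGetD dp i []) 0 1)
    (PySem.List.pyRange 1 (k + 1) 1).foldl (fun dp j =>
      let dp := PySem.List.pySetD dp i (PySem.List.pySetD (PySem.List.pyGetD dp i []) j
        (PySem.List.pyGetD (PySem.List.pyGetD dp (i - 1) []) j 0))
      let maxK := i - j + 2
      let dp := (PySem.List.pyRange 1 maxK 1).foldl (fun dp kLen =>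
        PySem.List.pySetD dp i (PySem.List.pySetD (PySem.List.pyGetD dp i []) j
          (PySem.List.pyGetD (PySem.List.pyGetD dp i []) j 0 +
           PySem.List.pyGetD (PySem.List.pyGetD dp (i - kLen) []) (j - 1) 0))) dp
      PySem.List.pySetD dp i (PySem.List.pySetD (PySem.List.pyGetD dp i []) j
        (PySem.Int.mod (PySem.List.pyGetD (PySem.List.pyGetD dp i []) j 0) md))) dp) dp
  PySem.List.pyGetD (PySem.List.pyGetD dp (n - 1) []) k 0

-- ===== PORT B =====
def numberOfSets3_alt (n : Int) (k : Int) : Int :=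
  let md : Int := 10 ^ 9 + 7
  let prev : List Int := List.replicate n.toNat 1
  let prev := (PySem.List.pyRange 1 (k + 1) 1).foldl (fun prev j =>
    let res := (PySem.List.pyRange 1 n 1).foldl (fun (st : List Int × Int) i =>
      let s := if j ≤ i then PySem.Int.mod (st.2 + PySem.List.pyGetD prev (i - 1) 0) md else st.2
      (PySem.List.pySetD st.1 i (PySem.Int.mod (PySem.List.pyGetD st.1 (i - 1) 0 + s) md), s))
      (List.replicate n.toNat 0, (0 : Int))
    res.1) prev
  PySem.List.pyGetD prev (n - 1) 0

-- ===== PRECONDITION & SPEC =====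
-- Pre_ excludes exactly the inputs (n < 1 or k < 0) on which the Python A raises IndexError.
def Pre_numberOfSets3 (n : Int) (k : Int) : Prop := 1 ≤ n ∧ 0 ≤ k
instance (n : Int) (k : Int) : Decidable (Pre_numberOfSets3 n k) := by unfold Pre_numberOfSets3; infer_instance
def pvWitness_numberOfSets3 : Int × Int := (3, 2)
def Spec_numberOfSets3 (n : Int) (k : Int) (out : Int) : Prop := out = numberOfSets3_alt n k
instance (n : Int) (k : Int) (out : Int) : Decidable (Spec_numberOfSets3 n k out) := by unfold Spec_numberOfSets3; infer_instance

-- ===== CLAIM (what is proved, stated in full; the proofs are below) =====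
def Claim_equal_numberOfSets3 : Prop := ∀ (n : Int) (k : Int), Dom_numberOfSets3 n k → Pre_numberOfSets3 n k → Spec_numberOfSets3 n k (numberOfSets3 n k)

-- ===== LEMMAS AND PROOFS =====


theorem pvCellSet (dp : List (List Int)) (i j : Nat) (v : Int) :
    PySem.List.pySetD dp (i:Int) (PySem.List.pySetD (PySem.List.pyGetD dp (i:Int) []) (j:Int) v)
      = dp.set i ((dp.getD i []).set j v) := by
  rw [PySem.List.pySetD_natCast, PySem.List.pyGetD_natCast, PySem.List.pySetD_natCast]

theorem pvCellGet (dp : List (List Int)) (i j : Nat) (hj : j < (dp.getD i []).length) :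
    PySem.List.pyGetD (PySem.List.pyGetD dp (i:Int) []) (j:Int) 0 = (dp.getD i [])[j] := by
  rw [PySem.List.pyGetD_natCast, PySem.List.pyGetD_natCast, List.getD_eq_getElem _ _ hj]

theorem pvRowRead (dp : List (List Int)) (r : List Int) (i w : Nat) (hw : w ≠ i) (hwlen : w < dp.length) (z : Int) (jj : Int) :
    PySem.List.pyGetD (PySem.List.pyGetD (dp.set i r) (w:Int) []) jj z
      = PySem.List.pyGetD (PySem.List.pyGetD dp (w:Int) []) jj z := by
  rw [PySem.List.pyGetD_natCast, PySem.List.pyGetD_natCast,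
    List.getD_eq_getElem _ _ (by simpa using hwlen), List.getD_eq_getElem _ _ hwlen,
    List.getElem_set_ne (by omega)]

theorem pvInnerFold (dp : List (List Int)) (i j : Nat) (L : List Int)
    (hi : i < dp.length) (hj : j < (dp.getD i []).length)
    (hL : ∀ x ∈ L, 1 ≤ x ∧ x ≤ (i : Int)) :
    L.foldl (fun d kLen =>
      PySem.List.pySetD d (i:Int) (PySem.List.pySetD (PySem.List.pyGetD d (i:Int) []) (j:Int)
        (PySem.List.pyGetD (PySem.List.pyGetD d (i:Int) []) (j:Int) 0 +
         PySem.List.pyGetD (PySem.List.pyGetD d ((i:Int) - kLen) []) ((j:Int) - 1) 0))) dp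
    = PySem.List.pySetD dp (i:Int) (PySem.List.pySetD (PySem.List.pyGetD dp (i:Int) []) (j:Int)
        (PySem.List.pyGetD (PySem.List.pyGetD dp (i:Int) []) (j:Int) 0 +
         (L.map (fun kLen => PySem.List.pyGetD (PySem.List.pyGetD dp ((i:Int) - kLen) []) ((j:Int) - 1) 0)).sum)) := by
  induction L generalizing dp with
  | nil =>
    simp only [List.foldl_nil, List.map_nil, List.sum_nil, add_zero]
    rw [pvCellGet dp i j hj, pvCellSet, List.set_getElem_self, List.getD_eq_getElem _ _ hi,
      List.set_getElem_self]
  | cons x L ih =>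
    obtain ⟨hx1, hx2⟩ := hL x (List.mem_cons_self)
    rw [List.foldl_cons]
    set c := PySem.List.pyGetD (PySem.List.pyGetD dp ((i:Int) - x) []) ((j:Int) - 1) 0 with hcdef
    set row := dp.getD i [] with hrowdef
    have h1 : (PySem.List.pySetD dp (i:Int) (PySem.List.pySetD (PySem.List.pyGetD dp (i:Int) []) (j:Int)
        (PySem.List.pyGetD (PySem.List.pyGetD dp (i:Int) []) (j:Int) 0 +
         PySem.List.pyGetD (PySem.List.pyGetD dp ((i:Int) - x) []) ((j:Int) - 1) 0)))
        = dp.set i (row.set j (row[j] + c)) := by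
      rw [pvCellGet dp i j hj, pvCellSet]
    have hconv : List.foldl (fun d kLen =>
        PySem.List.pySetD d (i:Int) (PySem.List.pySetD (PySem.List.pyGetD d (i:Int) []) (j:Int)
          (PySem.List.pyGetD (PySem.List.pyGetD d (i:Int) []) (j:Int) 0 +
           PySem.List.pyGetD (PySem.List.pyGetD d ((i:Int) - kLen) []) ((j:Int) - 1) 0)))
        (dp.set i (row.set j (row[j] + c))) L
        = _ := ih (dp.set i (row.set j (row[j] + c))) (by simpa using hi)
          (by rw [List.getD_eq_getElem _ _ (by simpa using hi)]
              simp [hj]) (fun y hy => hL y (List.mem_cons_of_mem _ hy))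
    rw [h1, hconv]
    -- now rewrite reads over the modified dp back to dp
    have hget : (dp.set i (row.set j (row[j] + c))).getD i [] = row.set j (row[j] + c) := by
      rw [List.getD_eq_getElem _ _ (by simpa using hi)]
      simp
    have hcell : PySem.List.pyGetD (PySem.List.pyGetD (dp.set i (row.set j (row[j] + c))) (i:Int) []) (j:Int) 0
        = row[j] + c := by
      rw [pvCellGet _ i j (by rw [hget]; simpa using hj)]
      simp [hi]
    have hmap : (L.map (fun kLen => PySem.List.pyGetD (PySem.List.pyGetD (dp.set i (row.set j (row[j] + c))) ((i:Int) - kLen) []) ((j:Int) - 1) 0))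
        = L.map (fun kLen => PySem.List.pyGetD (PySem.List.pyGetD dp ((i:Int) - kLen) []) ((j:Int) - 1) 0) := by
      apply List.map_congr_left
      intro y hy
      obtain ⟨hy1, hy2⟩ := hL y (List.mem_cons_of_mem _ hy)
      have hcast : ((i:Int) - y) = ((i - y.toNat : Nat) : Int) := by omega
      rw [hcast, pvRowRead dp _ i (i - y.toNat) (by omega) (by omega)]
    rw [pvCellSet, hget, hcell, hmap, pvCellGet dp i j hj, pvCellSet, List.set_set, List.set_set,
      List.map_cons, List.sum_cons, add_assoc]

def pvD : Nat → Nat → Int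
  | _, 0 => 1
  | 0, _ + 1 => 0
  | i + 1, j + 1 =>
    PySem.Int.mod (pvD i (j + 1) + ((List.range (i + 1 - j)).map (fun t => pvD (j + t) j)).sum)
      1000000007
termination_by i j => (j, i)
decreasing_by
  · exact Prod.Lex.right _ (by omega)
  · exact Prod.Lex.left _ _ (by omega)
theorem pvD_zero (i : Nat) : pvD i 0 = 1 := by rw [pvD]
theorem pvD_zero_succ (j : Nat) : pvD 0 (j + 1) = 0 := by rw [pvD]
theorem pvD_succ (i j : Nat) : pvD (i + 1) (j + 1) =
    PySem.Int.mod (pvD i (j + 1) + ((List.range (i + 1 - j)).map (fun t => pvD (j + t) j)).sum)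
      1000000007 := by rw [pvD]
def pvRowD (K i : Nat) : List Int := (List.range (K + 1)).map (fun j => pvD i j)
def pvPRow (K i j : Nat) : List Int := (List.range (K + 1)).map (fun j' => if j' ≤ j then pvD i j' else 0)
def pvStA (N K i : Nat) : List (List Int) := (List.range N).map (fun r => if r < i then pvRowD K r else List.replicate (K + 1) 0)
def pvStM (N K i j : Nat) : List (List Int) := (pvStA N K i).set i (pvPRow K i j)
theorem pvMapRangeSet {α : Type} (f : Nat → α) (m j : Nat) (v : α) :
    ((List.range m).map f).set j v = (List.range m).map (fun x => if x = j then v else f x) := by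
  apply List.ext_getElem (by simp)
  intro i h1 h2
  simp only [List.getElem_set, List.getElem_map, List.getElem_range]
  split_ifs <;> first | rfl | omega

theorem pvListFinset (f : Nat → Int) (n : Nat) :
    ((List.range n).map f).sum = ∑ x ∈ Finset.range n, f x := rfl

theorem pvLenStA (N K i : Nat) : (pvStA N K i).length = N := by simp [pvStA]

theorem pvStA_getD (N K i r : Nat) (hr : r < N) :
    (pvStA N K i).getD r [] = if r < i then pvRowD K r else List.replicate (K + 1) 0 := by
  rw [pvStA, PySem.List.getD_map_range _ _ _ _ hr]

theorem pvRowD_getD (K r m : Nat) (hm : m < K + 1) :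
    PySem.List.pyGetD (pvRowD K r) (m : Int) 0 = pvD r m := by
  rw [PySem.List.pyGetD_natCast, pvRowD, PySem.List.getD_map_range _ _ _ _ hm]

-- read a row r ≠ i of (pvStA N K i).set i q, r < i: it is still the finished row pvRowD K r
theorem pvStASet_read (N K i r : Nat) (q : List Int) (hr : r < i) (hiN : i < N) (w z : Int) :
    PySem.List.pyGetD (PySem.List.pyGetD ((pvStA N K i).set i q) (r:Int) []) w z
      = PySem.List.pyGetD (pvRowD K r) w z := by
  rw [pvRowRead _ _ _ _ (by omega) (by rw [pvLenStA]; omega)]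
  congr 1
  rw [PySem.List.pyGetD_natCast, pvStA_getD _ _ _ _ (by omega), if_pos hr]

theorem pvStASet_getD (N K i : Nat) (q : List Int) (hiN : i < N) :
    ((pvStA N K i).set i q).getD i [] = q := by
  rw [List.getD_eq_getElem _ _ (by rw [List.length_set, pvLenStA]; omega)]
  simp

theorem pvSumA2 (i m : Nat) (hm : 1 ≤ m) :
    ((PySem.List.pyRange 1 ((i:Int) - (m:Int) + 2) 1).map (fun kLen => pvD ((i:Int) - kLen).toNat (m - 1))).sum
    = ((List.range (i + 1 - m)).map (fun t => pvD (m - 1 + t) (m - 1))).sum := by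
  by_cases hij : m ≤ i
  · have hL : (((i:Int) - (m:Int) + 2) - 1).toNat = i + 1 - m := by omega
    rw [PySem.List.pyRange_one, hL, List.map_map, pvListFinset, pvListFinset,
      ← Finset.sum_range_reflect]
    apply Finset.sum_congr rfl
    intro s hs
    rw [Finset.mem_range] at hs
    simp only [Function.comp]
    congr 1
    omega
  · rw [PySem.List.pyRange_one_eq_nil (by omega), show i + 1 - m = 0 by omega]
    simp

theorem pvCellOfSet (N K i m : Nat) (row : List Int) (hiN : i < N) (hm : m < row.length) :
    PySem.List.pyGetD (PySem.List.pyGetD ((pvStA N K i).set i row) (i:Int) []) (m:Int) 0 = row[m] := by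
  rw [PySem.List.pyGetD_natCast ((pvStA N K i).set i row) i, pvStASet_getD _ _ _ _ hiN,
    PySem.List.pyGetD_natCast, List.getD_eq_getElem _ _ hm]

theorem pvMidStep (N K i m : Nat) (h1 : 1 ≤ i) (h2 : i < N) (hm : 1 ≤ m) (hmK : m < K + 1) :
    ((fun (dp : List (List Int)) (j : Int) =>
      let dp := PySem.List.pySetD dp (i:Int) (PySem.List.pySetD (PySem.List.pyGetD dp (i:Int) []) j
        (PySem.List.pyGetD (PySem.List.pyGetD dp ((i:Int) - 1) []) j 0))
      let maxK := (i:Int) - j + 2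
      let dp := (PySem.List.pyRange 1 maxK 1).foldl (fun d kLen =>
        PySem.List.pySetD d (i:Int) (PySem.List.pySetD (PySem.List.pyGetD d (i:Int) []) j
          (PySem.List.pyGetD (PySem.List.pyGetD d (i:Int) []) j 0 +
           PySem.List.pyGetD (PySem.List.pyGetD d ((i:Int) - kLen) []) (j - 1) 0))) dp
      PySem.List.pySetD dp (i:Int) (PySem.List.pySetD (PySem.List.pyGetD dp (i:Int) []) j
        (PySem.Int.mod (PySem.List.pyGetD (PySem.List.pyGetD dp (i:Int) []) j 0) 1000000007)))
      (pvStM N K i (m - 1)) (m : Int))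
    = pvStM N K i m := by
  have hrow1len : ((pvPRow K i (m - 1)).set m (pvD (i - 1) m)).length = K + 1 := by
    simp [pvPRow]
  have hv1 : PySem.List.pyGetD (PySem.List.pyGetD (pvStM N K i (m - 1)) ((i:Int) - 1) []) (m:Int) 0
      = pvD (i - 1) m := by
    rw [show ((i:Int) - 1) = ((i - 1 : Nat) : Int) by omega, pvStM,
      pvStASet_read _ _ _ _ _ (by omega) h2, pvRowD_getD _ _ _ hmK]
  show (PySem.List.pySetD
      ((PySem.List.pyRange 1 ((i:Int) - (m:Int) + 2) 1).foldl (fun d kLen =>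
        PySem.List.pySetD d (i:Int) (PySem.List.pySetD (PySem.List.pyGetD d (i:Int) []) (m:Int)
          (PySem.List.pyGetD (PySem.List.pyGetD d (i:Int) []) (m:Int) 0 +
           PySem.List.pyGetD (PySem.List.pyGetD d ((i:Int) - kLen) []) ((m:Int) - 1) 0)))
        (PySem.List.pySetD (pvStM N K i (m - 1)) (i:Int)
          (PySem.List.pySetD (PySem.List.pyGetD (pvStM N K i (m - 1)) (i:Int) []) (m:Int)
            (PySem.List.pyGetD (PySem.List.pyGetD (pvStM N K i (m - 1)) ((i:Int) - 1) []) (m:Int) 0))))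
      (i:Int)
      (PySem.List.pySetD
        (PySem.List.pyGetD ((PySem.List.pyRange 1 ((i:Int) - (m:Int) + 2) 1).foldl (fun d kLen =>
          PySem.List.pySetD d (i:Int) (PySem.List.pySetD (PySem.List.pyGetD d (i:Int) []) (m:Int)
            (PySem.List.pyGetD (PySem.List.pyGetD d (i:Int) []) (m:Int) 0 +
             PySem.List.pyGetD (PySem.List.pyGetD d ((i:Int) - kLen) []) ((m:Int) - 1) 0)))
          (PySem.List.pySetD (pvStM N K i (m - 1)) (i:Int)
            (PySem.List.pySetD (PySem.List.pyGetD (pvStM N K i (m - 1)) (i:Int) []) (m:Int)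
              (PySem.List.pyGetD (PySem.List.pyGetD (pvStM N K i (m - 1)) ((i:Int) - 1) []) (m:Int) 0)))) (i:Int) [])
        (m:Int)
        (PySem.Int.mod
          (PySem.List.pyGetD
            (PySem.List.pyGetD ((PySem.List.pyRange 1 ((i:Int) - (m:Int) + 2) 1).foldl (fun d kLen =>
              PySem.List.pySetD d (i:Int) (PySem.List.pySetD (PySem.List.pyGetD d (i:Int) []) (m:Int)
                (PySem.List.pyGetD (PySem.List.pyGetD d (i:Int) []) (m:Int) 0 +
                 PySem.List.pyGetD (PySem.List.pyGetD d ((i:Int) - kLen) []) ((m:Int) - 1) 0)))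
              (PySem.List.pySetD (pvStM N K i (m - 1)) (i:Int)
                (PySem.List.pySetD (PySem.List.pyGetD (pvStM N K i (m - 1)) (i:Int) []) (m:Int)
                  (PySem.List.pyGetD (PySem.List.pyGetD (pvStM N K i (m - 1)) ((i:Int) - 1) []) (m:Int) 0)))) (i:Int) [])
            (m:Int) 0) 1000000007)))
    = pvStM N K i m
  rw [hv1]
  have hD1 : PySem.List.pySetD (pvStM N K i (m - 1)) (i:Int)
      (PySem.List.pySetD (PySem.List.pyGetD (pvStM N K i (m - 1)) (i:Int) []) (m:Int) (pvD (i - 1) m))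
      = (pvStA N K i).set i ((pvPRow K i (m - 1)).set m (pvD (i - 1) m)) := by
    rw [pvCellSet, pvStM, pvStASet_getD _ _ _ _ h2, List.set_set]
  rw [hD1]
  rw [pvInnerFold _ i m _ (by rw [List.length_set, pvLenStA]; omega)
    (by rw [pvStASet_getD _ _ _ _ h2]; rw [hrow1len]; omega)
    (by intro x hx
        rw [PySem.List.mem_pyRange_one] at hx
        have hmi : (1:Int) ≤ (m:Int) := by exact_mod_cast hm
        exact ⟨hx.1, by omega⟩)]
  have hcell : PySem.List.pyGetD (PySem.List.pyGetD ((pvStA N K i).set i ((pvPRow K i (m - 1)).set m (pvD (i - 1) m))) (i:Int) []) (m:Int) 0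
      = pvD (i - 1) m := by
    rw [pvCellOfSet _ _ _ _ _ h2 (by rw [hrow1len]; omega)]
    simp
  rw [hcell]
  have hmap : ((PySem.List.pyRange 1 ((i:Int) - (m:Int) + 2) 1).map (fun kLen =>
      PySem.List.pyGetD (PySem.List.pyGetD ((pvStA N K i).set i ((pvPRow K i (m - 1)).set m (pvD (i - 1) m))) ((i:Int) - kLen) []) ((m:Int) - 1) 0))
      = (PySem.List.pyRange 1 ((i:Int) - (m:Int) + 2) 1).map (fun kLen => pvD ((i:Int) - kLen).toNat (m - 1)) := by
    apply List.map_congr_left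
    intro x hx
    rw [PySem.List.mem_pyRange_one] at hx
    have hmi : (1:Int) ≤ (m:Int) := by exact_mod_cast hm
    have hcast : ((i:Int) - x) = ((((i:Int) - x).toNat : Nat) : Int) := by omega
    have hcast2 : ((m:Int) - 1) = ((m - 1 : Nat) : Int) := by omega
    rw [hcast, pvStASet_read _ _ _ _ _ (by omega) h2, hcast2, pvRowD_getD _ _ _ (by omega), Int.toNat_natCast]
  rw [hmap, pvSumA2 i m hm]
  have hcell2 : PySem.List.pyGetD (PySem.List.pyGetD ((pvStA N K i).set i
      ((pvPRow K i (m - 1)).set m (pvD (i - 1) m + ((List.range (i + 1 - m)).map (fun t => pvD (m - 1 + t) (m - 1))).sum))) (i:Int) []) (m:Int) 0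
      = pvD (i - 1) m + ((List.range (i + 1 - m)).map (fun t => pvD (m - 1 + t) (m - 1))).sum := by
    rw [pvCellOfSet _ _ _ _ _ h2 (by simp [pvPRow]; omega)]
    simp
  rw [pvCellSet ((pvStA N K i).set i ((pvPRow K i (m - 1)).set m (pvD (i - 1) m))) i m,
    pvStASet_getD _ _ _ _ h2, List.set_set, List.set_set, hcell2,
    pvCellSet, pvStASet_getD _ _ _ _ h2, List.set_set, List.set_set]
  have hmod : PySem.Int.mod (pvD (i - 1) m + ((List.range (i + 1 - m)).map (fun t => pvD (m - 1 + t) (m - 1))).sum) 1000000007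
      = pvD i m := by
    obtain ⟨i', rfl⟩ : ∃ i', i = i' + 1 := ⟨i - 1, by omega⟩
    obtain ⟨m', rfl⟩ : ∃ m', m = m' + 1 := ⟨m - 1, by omega⟩
    rw [pvD_succ]
    simp only [Nat.succ_sub_succ, Nat.sub_zero]
  rw [hmod]
  have hrow : (pvPRow K i (m - 1)).set m (pvD i m) = pvPRow K i m := by
    rw [pvPRow, pvMapRangeSet, pvPRow]
    apply List.map_congr_left
    intro x hx
    split_ifs <;> first | rfl | omega | (subst_vars; rfl)
  rw [hrow, pvStM]

theorem pvFold1 {α : Type} (body : α → Int → α) (inv : Nat → α) (hi : Nat) (hhi : 1 ≤ hi) :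
    (∀ m : Nat, 1 ≤ m → m < hi → body (inv m) (m : Int) = inv (m + 1)) →
    (PySem.List.pyRange 1 (hi : Int) 1).foldl body (inv 1) = inv hi := by
  induction hi, hhi using Nat.le_induction with
  | base =>
    intro _
    rw [show ((1:Nat):Int) = 1 by norm_num, PySem.List.pyRange_one_eq_nil (le_refl _)]
    rfl
  | succ n hn ih =>
    intro step
    have h1 : ((n + 1 : Nat) : Int) = (n : Int) + 1 := by push_cast; ring
    rw [h1, PySem.List.pyRange_one_succ_right (by exact_mod_cast hn), List.foldl_append,
      ih (fun m a b => step m a (by omega))]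
    simpa using step n hn (by omega)

theorem pvZRow1 (K : Nat) : (List.replicate (K + 1) (0:Int)).set 0 1 = pvRowD K 0 := by
  apply List.ext_getElem (by simp [pvRowD])
  intro x h1 h2
  simp only [List.getElem_set, List.getElem_replicate, pvRowD, List.getElem_map, List.getElem_range]
  cases x with
  | zero => simp [pvD_zero]
  | succ t => rw [if_neg (by omega), pvD_zero_succ]

theorem pvZRowP (K i : Nat) : (List.replicate (K + 1) (0:Int)).set 0 1 = pvPRow K i 0 := by
  apply List.ext_getElem (by simp [pvPRow])
  intro x h1 h2
  simp only [List.getElem_set, List.getElem_replicate, pvPRow, List.getElem_map, List.getElem_range]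
  cases x with
  | zero => simp [pvD_zero]
  | succ t => rw [if_neg (by omega), if_neg (by omega)]

theorem pvPRowFull (K i : Nat) : pvPRow K i K = pvRowD K i := by
  rw [pvPRow, pvRowD]
  apply List.map_congr_left
  intro x hx
  rw [List.mem_range] at hx
  rw [if_pos (by omega)]

theorem pvStM_last (N K i : Nat) : pvStM N K i K = pvStA N K (i + 1) := by
  rw [pvStM, pvPRowFull, pvStA, pvStA, pvMapRangeSet]
  apply List.map_congr_left
  intro x hx
  rw [List.mem_range] at hx
  split_ifs <;> first | rfl | omega | (subst_vars; rfl)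

theorem pvRowStep (N K i : Nat) (h1 : 1 ≤ i) (h2 : i < N) :
    ((fun (dp : List (List Int)) (ii : Int) =>
      let dp := PySem.List.pySetD dp ii (PySem.List.pySetD (PySem.List.pyGetD dp ii []) 0 1)
      (PySem.List.pyRange 1 ((K:Int) + 1) 1).foldl (fun dp j =>
        let dp := PySem.List.pySetD dp ii (PySem.List.pySetD (PySem.List.pyGetD dp ii []) j
          (PySem.List.pyGetD (PySem.List.pyGetD dp (ii - 1) []) j 0))
        let maxK := ii - j + 2
        let dp := (PySem.List.pyRange 1 maxK 1).foldl (fun d kLen =>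
          PySem.List.pySetD d ii (PySem.List.pySetD (PySem.List.pyGetD d ii []) j
            (PySem.List.pyGetD (PySem.List.pyGetD d ii []) j 0 +
             PySem.List.pyGetD (PySem.List.pyGetD d (ii - kLen) []) (j - 1) 0))) dp
        PySem.List.pySetD dp ii (PySem.List.pySetD (PySem.List.pyGetD dp ii []) j
          (PySem.Int.mod (PySem.List.pyGetD (PySem.List.pyGetD dp ii []) j 0) 1000000007))) dp)
      (pvStA N K i) (i : Int))
    = pvStA N K (i + 1) := by
  show (PySem.List.pyRange 1 ((K:Int) + 1) 1).foldl (fun dp j =>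
      let dp := PySem.List.pySetD dp (i:Int) (PySem.List.pySetD (PySem.List.pyGetD dp (i:Int) []) j
        (PySem.List.pyGetD (PySem.List.pyGetD dp ((i:Int) - 1) []) j 0))
      let maxK := (i:Int) - j + 2
      let dp := (PySem.List.pyRange 1 maxK 1).foldl (fun d kLen =>
        PySem.List.pySetD d (i:Int) (PySem.List.pySetD (PySem.List.pyGetD d (i:Int) []) j
          (PySem.List.pyGetD (PySem.List.pyGetD d (i:Int) []) j 0 +
           PySem.List.pyGetD (PySem.List.pyGetD d ((i:Int) - kLen) []) (j - 1) 0))) dp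
      PySem.List.pySetD dp (i:Int) (PySem.List.pySetD (PySem.List.pyGetD dp (i:Int) []) j
        (PySem.Int.mod (PySem.List.pyGetD (PySem.List.pyGetD dp (i:Int) []) j 0) 1000000007)))
      (PySem.List.pySetD (pvStA N K i) (i:Int)
        (PySem.List.pySetD (PySem.List.pyGetD (pvStA N K i) (i:Int) []) 0 1))
    = pvStA N K (i + 1)
  have hinit : PySem.List.pySetD (pvStA N K i) (i:Int)
      (PySem.List.pySetD (PySem.List.pyGetD (pvStA N K i) (i:Int) []) 0 1) = pvStM N K i 0 := by
    rw [PySem.List.pyGetD_natCast, pvStA_getD _ _ _ _ h2, if_neg (by omega),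
      PySem.List.pySetD_of_nonneg _ _ (show (0:Int) ≤ 0 from le_refl 0),
      show ((0:Int)).toNat = 0 from rfl, pvZRowP K i, PySem.List.pySetD_natCast, pvStM]
  rw [hinit, show ((K:Int) + 1) = (((K + 1 : Nat)) : Int) by push_cast; ring]
  refine Eq.trans (pvFold1 _ (fun t => pvStM N K i (t - 1)) (K + 1) (by omega)
    (fun m hm hmK => pvMidStep N K i m h1 h2 hm (by omega))) ?_
  show pvStM N K i (K + 1 - 1) = pvStA N K (i + 1)
  rw [Nat.add_sub_cancel]
  exact pvStM_last N K i

theorem pvA_eval_pre (N K : Nat) (hN : 1 ≤ N) :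
    numberOfSets3 (N : Int) (K : Int) = pvD (N - 1) K := by
  have hmd : (10:Int) ^ 9 + 7 = 1000000007 := by norm_num
  simp only [numberOfSets3, hmd]
  have hD00 : (PySem.List.pyRange 0 (N:Int) 1).map (fun _ => List.replicate (((K:Int)) + 1).toNat 0)
      = List.replicate N (List.replicate (K + 1) (0:Int)) := by
    rw [PySem.List.pyRange_zero_nat, show (((K:Int)) + 1).toNat = K + 1 by omega, List.map_map,
      show ((fun (_ : Int) => List.replicate (K+1) (0:Int)) ∘ (fun (k : Nat) => (k:Int)))
        = (fun (_ : Nat) => List.replicate (K+1) (0:Int)) from rfl, List.map_const']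
    simp
  rw [hD00]
  have hinit : PySem.List.pySetD (List.replicate N (List.replicate (K + 1) (0:Int))) 0
      (PySem.List.pySetD (PySem.List.pyGetD (List.replicate N (List.replicate (K + 1) (0:Int))) 0 []) 0 1)
      = pvStA N K 1 := by
    rw [PySem.List.pyGetD_zero, List.getD_eq_getElem _ _ (by simp; omega), List.getElem_replicate,
      PySem.List.pySetD_of_nonneg _ _ (le_refl 0), show ((0:Int)).toNat = 0 from rfl,
      PySem.List.pySetD_of_nonneg _ _ (le_refl 0), show ((0:Int)).toNat = 0 from rfl, pvZRow1]
    apply List.ext_getElem (by simp [pvStA])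
    intro x hx1 hx2
    simp only [List.getElem_set, List.getElem_replicate, pvStA, List.getElem_map, List.getElem_range]
    cases x with
    | zero => simp
    | succ t => rw [if_neg (by omega), if_neg (by omega)]
  rw [hinit]
  rw [show (PySem.List.pyRange 1 (N:Int) 1).foldl (fun dp i =>
      let dp := PySem.List.pySetD dp i (PySem.List.pySetD (PySem.List.pyGetD dp i []) 0 1)
      (PySem.List.pyRange 1 ((K:Int) + 1) 1).foldl (fun dp j =>
        let dp := PySem.List.pySetD dp i (PySem.List.pySetD (PySem.List.pyGetD dp i []) j
          (PySem.List.pyGetD (PySem.List.pyGetD dp (i - 1) []) j 0))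
        let maxK := i - j + 2
        let dp := (PySem.List.pyRange 1 maxK 1).foldl (fun dp kLen =>
          PySem.List.pySetD dp i (PySem.List.pySetD (PySem.List.pyGetD dp i []) j
            (PySem.List.pyGetD (PySem.List.pyGetD dp i []) j 0 +
             PySem.List.pyGetD (PySem.List.pyGetD dp (i - kLen) []) (j - 1) 0))) dp
        PySem.List.pySetD dp i (PySem.List.pySetD (PySem.List.pyGetD dp i []) j
          (PySem.Int.mod (PySem.List.pyGetD (PySem.List.pyGetD dp i []) j 0) 1000000007))) dp)
      (pvStA N K 1) = pvStA N K N
    from pvFold1 _ (pvStA N K) N hN (fun m hm hmN => pvRowStep N K m hm hmN)]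
  rw [show ((N:Int) - 1) = ((N - 1 : Nat) : Int) by omega,
    PySem.List.pyGetD_natCast (pvStA N K N) (N - 1) [], pvStA_getD _ _ _ _ (by omega),
    if_pos (by omega), pvRowD_getD _ _ _ (by omega)]

def pvColD (N j : Nat) : List Int := (List.range N).map (fun r => pvD r j)
def pvCur (N j m : Nat) : List Int := (List.range N).map (fun r => if r ≤ m then pvD r j else 0)
def pvS (j m : Nat) : Int := PySem.Int.mod (((List.range (m + 1 - j)).map (fun t => pvD (j - 1 + t) (j - 1))).sum) 1000000007

theorem pvModAddLeft (a b : Int) :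
    PySem.Int.mod (PySem.Int.mod a 1000000007 + b) 1000000007 = PySem.Int.mod (a + b) 1000000007 := by
  rw [PySem.Int.mod_eq_emod_of_pos (by norm_num), PySem.Int.mod_eq_emod_of_pos (by norm_num),
    PySem.Int.mod_eq_emod_of_pos (by norm_num), Int.emod_add_emod]
theorem pvModAddRight (a b : Int) :
    PySem.Int.mod (a + PySem.Int.mod b 1000000007) 1000000007 = PySem.Int.mod (a + b) 1000000007 := by
  rw [PySem.Int.mod_eq_emod_of_pos (by norm_num), PySem.Int.mod_eq_emod_of_pos (by norm_num),
    PySem.Int.mod_eq_emod_of_pos (by norm_num), Int.add_emod_emod]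

-- s-invariant step
theorem pvS_zero (j : Nat) (hj : 1 ≤ j) : pvS j 0 = 0 := by
  have : 0 + 1 - j = 0 := by omega
  rw [pvS, this]
  simp

theorem pvS_step_add (j t : Nat) (hj : 1 ≤ j) (hjt : j ≤ t) :
    PySem.Int.mod (pvS j (t - 1) + pvD (t - 1) (j - 1)) 1000000007 = pvS j t := by
  rw [pvS, pvS, pvModAddLeft]
  congr 1
  have h1 : t + 1 - j = (t - j) + 1 := by omega
  have h2 : (t - 1) + 1 - j = t - j := by omega
  rw [h1, h2, List.range_succ, List.map_append, List.sum_append]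
  simp
  congr 1
  omega

theorem pvS_step_skip (j t : Nat) (hj : 1 ≤ t) (hjt : t < j) : pvS j (t - 1) = pvS j t := by
  rw [pvS, pvS]
  have : t + 1 - j = 0 := by omega
  have h2 : (t - 1) + 1 - j = 0 := by omega
  rw [this, h2]

-- the inner-loop step for B
theorem pvInnerStepB (N m t : Nat) (hm : 1 ≤ m) (ht : 1 ≤ t) (htN : t < N) :
    ((fun (st : List Int × Int) (i : Int) =>
      let s := if (m : Int) ≤ i then PySem.Int.mod (st.2 + PySem.List.pyGetD (pvColD N (m - 1)) (i - 1) 0) 1000000007 else st.2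
      (PySem.List.pySetD st.1 i (PySem.Int.mod (PySem.List.pyGetD st.1 (i - 1) 0 + s) 1000000007), s))
      (pvCur N m (t - 1), pvS m (t - 1)) (t : Int))
    = (pvCur N m t, pvS m t) := by
  show (PySem.List.pySetD (pvCur N m (t - 1)) (t : Int)
      (PySem.Int.mod (PySem.List.pyGetD (pvCur N m (t - 1)) ((t : Int) - 1) 0 +
        (if (m : Int) ≤ (t : Int) then
          PySem.Int.mod (pvS m (t - 1) + PySem.List.pyGetD (pvColD N (m - 1)) ((t : Int) - 1) 0) 1000000007
        else pvS m (t - 1))) 1000000007),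
      (if (m : Int) ≤ (t : Int) then
        PySem.Int.mod (pvS m (t - 1) + PySem.List.pyGetD (pvColD N (m - 1)) ((t : Int) - 1) 0) 1000000007
      else pvS m (t - 1))) = (pvCur N m t, pvS m t)
  have hc : ((t : Int) - 1) = ((t - 1 : Nat) : Int) := by omega
  have hprev : PySem.List.pyGetD (pvColD N (m - 1)) ((t : Int) - 1) 0 = pvD (t - 1) (m - 1) := by
    rw [hc, PySem.List.pyGetD_natCast, pvColD, PySem.List.getD_map_range _ _ _ _ (by omega)]
  have hs : (if (m : Int) ≤ (t : Int) then
      PySem.Int.mod (pvS m (t - 1) + PySem.List.pyGetD (pvColD N (m - 1)) ((t : Int) - 1) 0) 1000000007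
      else pvS m (t - 1)) = pvS m t := by
    by_cases hmt : m ≤ t
    · rw [if_pos (by exact_mod_cast hmt), hprev, pvS_step_add m t hm hmt]
    · rw [if_neg (by exact_mod_cast hmt), pvS_step_skip m t ht (by omega)]
  rw [hs]
  have hcurprev : PySem.List.pyGetD (pvCur N m (t - 1)) ((t : Int) - 1) 0 = pvD (t - 1) m := by
    rw [hc, PySem.List.pyGetD_natCast, pvCur, PySem.List.getD_map_range _ _ _ _ (by omega)]
    simp
  rw [hcurprev]
  have hval : PySem.Int.mod (pvD (t - 1) m + pvS m t) 1000000007 = pvD t m := by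
    obtain ⟨t', rfl⟩ : ∃ t', t = t' + 1 := ⟨t - 1, by omega⟩
    obtain ⟨m', rfl⟩ : ∃ m', m = m' + 1 := ⟨m - 1, by omega⟩
    rw [pvS, pvModAddRight, pvD_succ]
    simp only [Nat.succ_sub_succ, Nat.sub_zero]
  rw [hval]
  simp only [Prod.mk.injEq]
  refine ⟨?_, trivial⟩
  rw [PySem.List.pySetD_natCast, pvCur, pvCur, pvMapRangeSet]
  apply List.map_congr_left
  intro x hx
  split_ifs <;> first | rfl | omega | (subst_vars; rfl)

theorem pvCur_last (N m : Nat) (hN : 1 ≤ N) : pvCur N m (N - 1) = pvColD N m := by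
  rw [pvCur, pvColD]
  apply List.map_congr_left
  intro x hx
  rw [List.mem_range] at hx
  rw [if_pos (by omega)]

theorem pvCur_zero (N m : Nat) (hm : 1 ≤ m) : pvCur N m 0 = List.replicate N 0 := by
  rw [pvCur]
  have : ∀ x ∈ List.range N, (if x ≤ 0 then pvD x m else 0) = (fun (_ : Nat) => (0:Int)) x := by
    intro x hx
    split_ifs with h
    · obtain ⟨m', rfl⟩ : ∃ m', m = m' + 1 := ⟨m - 1, by omega⟩
      have : x = 0 := by omega
      subst this
      rw [pvD_zero_succ]
    · rfl
  rw [List.map_congr_left this, List.map_const']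
  simp

theorem pvColD_zero (N : Nat) : pvColD N 0 = List.replicate N 1 := by
  rw [pvColD]
  have : ∀ x ∈ List.range N, pvD x 0 = (fun (_ : Nat) => (1:Int)) x := fun x _ => pvD_zero x
  rw [List.map_congr_left this, List.map_const']
  simp

theorem pvB_eval (N K : Nat) (hN : 1 ≤ N) :
    numberOfSets3_alt (N : Int) (K : Int) = pvD (N - 1) K := by
  have hmd : (10:Int) ^ 9 + 7 = 1000000007 := by norm_num
  simp only [numberOfSets3_alt, hmd, Int.toNat_natCast]
  have houter : (PySem.List.pyRange 1 ((K : Int) + 1) 1).foldl (fun prev j =>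
      ((PySem.List.pyRange 1 (N : Int) 1).foldl (fun (st : List Int × Int) i =>
        let s := if j ≤ i then PySem.Int.mod (st.2 + PySem.List.pyGetD prev (i - 1) 0) 1000000007 else st.2
        (PySem.List.pySetD st.1 i (PySem.Int.mod (PySem.List.pyGetD st.1 (i - 1) 0 + s) 1000000007), s))
        (List.replicate N 0, (0 : Int))).1) (List.replicate N 1)
      = pvColD N K := by
    have hcast : ((K : Int) + 1) = (((K + 1 : Nat)) : Int) := by push_cast; ring
    rw [hcast, ← pvColD_zero N]
    have h0 : pvColD N 0 = pvColD N (1 - 1) := by norm_num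
    rw [h0]
    refine pvFold1 _ (fun t => pvColD N (t - 1)) (K + 1) (by omega) ?_
    intro m hm hmK
    show ((PySem.List.pyRange 1 (N : Int) 1).foldl (fun (st : List Int × Int) i =>
        let s := if (m : Int) ≤ i then PySem.Int.mod (st.2 + PySem.List.pyGetD (pvColD N (m - 1)) (i - 1) 0) 1000000007 else st.2
        (PySem.List.pySetD st.1 i (PySem.Int.mod (PySem.List.pyGetD st.1 (i - 1) 0 + s) 1000000007), s))
        (List.replicate N 0, (0 : Int))).1 = pvColD N (m + 1 - 1)
    have hinner : (PySem.List.pyRange 1 (N : Int) 1).foldl (fun (st : List Int × Int) i =>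
        let s := if (m : Int) ≤ i then PySem.Int.mod (st.2 + PySem.List.pyGetD (pvColD N (m - 1)) (i - 1) 0) 1000000007 else st.2
        (PySem.List.pySetD st.1 i (PySem.Int.mod (PySem.List.pyGetD st.1 (i - 1) 0 + s) 1000000007), s))
        (List.replicate N 0, (0 : Int)) = (pvCur N m (N - 1), pvS m (N - 1)) := by
      have hinit : ((List.replicate N (0:Int)), (0:Int)) = (pvCur N m (1 - 1), pvS m (1 - 1)) := by
        rw [show (1:Nat) - 1 = 0 from rfl, pvCur_zero N m hm, pvS_zero m hm]
      rw [hinit]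
      refine pvFold1 _ (fun t => (pvCur N m (t - 1), pvS m (t - 1))) N hN ?_
      intro t ht htN
      exact pvInnerStepB N m t hm ht htN
    rw [hinner]
    exact pvCur_last N m hN
  rw [houter]
  have hc : ((N : Int) - 1) = ((N - 1 : Nat) : Int) := by omega
  rw [hc, PySem.List.pyGetD_natCast, pvColD, PySem.List.getD_map_range _ _ _ _ (by omega)]

-- ===== VERDICT (by name: the statement is the Claim_ definition above) =====
theorem numberOfSets3_spec : Claim_equal_numberOfSets3 := by
  unfold Claim_equal_numberOfSets3
  intro n k _ hpre
  obtain ⟨h1, h2⟩ := hpre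
  unfold Spec_numberOfSets3
  have hn : n = ((n.toNat : Nat) : Int) := by omega
  have hk : k = ((k.toNat : Nat) : Int) := by omega
  rw [hn, hk, pvA_eval_pre _ _ (by omega), pvB_eval _ _ (by omega)]
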